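-- pv_equiv track=rewrite | github.com/kna163/partitions | src/partitions/parti.py | core_to_vec
-- ===== SOURCE A (Python) =====
-- Seq = list[int]
--
-- def ref_idx(seq : Seq) -> int:
--     zs = seq.count(0)
--     c = 0
--     for i,b in enumerate(seq):
--         if zs == c:
--             return i
--         if b == 0:
--             zs -= 1
--         else:
--             c += 1
--     return 0
--
-- def core_to_vec(seq : Seq, t : int) -> list[int]: #seq is the seq of a core
--     """6
--         [1, 0, 1, 1, 0, 0,
--          1, 1, 1, 0, 0, 1,
--     |||| 1, 0, 0, 1, 0, 1,
--          0, 1, 1, 1, 1, 1,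
--          1, 0, 1, 1, 0, 1,
--          0]"""
--     temp = [-1] * t
--     ref = ref_idx(seq)
--     for i in range(t):
--         j = 0
--         idx = (i - ref) % t
--         while j*t+i < len(seq):
--             if seq[j*t+i] == 1:
--                 break
--             j += 1
--         temp[idx] = (j*t+i-ref)//t
--     return temp
-- ===== SOURCE B (Python) =====
-- Seq = list[int]
--
-- def ref_idx(seq : Seq) -> int:
--     zs = seq.count(0)
--     c = 0
--     for i,b in enumerate(seq):
--         if zs == c:
--             return i
--         if b == 0:
--             zs -= 1
--         else:
--             c += 1
--     return 0
--
-- def core_to_vec(seq : Seq, t : int) -> list[int]: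
--     if t <= 0:
--         return []
--     ref = ref_idx(seq)
--     n = len(seq)
--     first = {}
--     for k, b in enumerate(seq):
--         i = k % t
--         if b == 1 and i not in first:
--             first[i] = k
--     out = []
--     for p in range(t):
--         i = (p + ref) % t
--         k = first.get(i)
--         if k is None:
--             j = max(0, -((i - n) // t))
--             k = j * t + i
--         out.append((k - ref) // t)
--     return out
-- ===== Notes on version B (the rewrite author's own statement) =====
-- stated objective: alternative
-- what changed: Replaces A's per-column while-loop scans into a mutated temp array by one flat enumerate pass that records each residue class's first 1 in a dict, then builds the output list directly in output order with a closed-form ceiling-division fallback for columns containing no 1.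
import Mathlib
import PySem

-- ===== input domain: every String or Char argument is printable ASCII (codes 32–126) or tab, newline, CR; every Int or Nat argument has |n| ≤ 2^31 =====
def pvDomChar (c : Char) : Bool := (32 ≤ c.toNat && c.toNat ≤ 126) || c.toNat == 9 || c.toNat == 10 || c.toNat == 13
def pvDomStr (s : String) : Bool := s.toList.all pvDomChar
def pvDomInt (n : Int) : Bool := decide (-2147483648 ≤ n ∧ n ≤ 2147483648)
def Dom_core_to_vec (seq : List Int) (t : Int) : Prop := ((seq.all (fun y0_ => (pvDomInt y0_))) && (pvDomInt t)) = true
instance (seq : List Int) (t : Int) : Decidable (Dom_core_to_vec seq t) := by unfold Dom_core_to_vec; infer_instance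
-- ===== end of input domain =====

-- B replaces A's per-column while-loop scans by one flat pass recording each residue
-- class's first 1 in a dict, plus a closed-form fallback; same results, similar cost.

-- ===== PORT A =====
-- shared module helper ref_idx (used verbatim by both A and B)
def refLoop (l : List (Int × Int)) (zs c : Int) : Int :=
  match l with
  | [] => 0
  | (i, b) :: rest =>
      if zs = c then i
      else if b = 0 then refLoop rest (zs - 1) c
      else refLoop rest zs (c + 1)

def ref_idx (seq : List Int) : Int :=
  refLoop (PySem.List.enumerate seq 0) ((PySem.List.count seq 0 : Nat) : Int) 0

-- A's inner 'while j*t+i < len(seq)' loop; fuel = len(seq)+1 always suffices on the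
-- inputs where A's loop runs (t ≥ 1, i ≥ 0), since j*t+i ≥ len(seq) at j = len(seq)
def whileA (seq : List Int) (t i : Int) (j : Int) (fuel : Nat) : Int :=
  match fuel with
  | 0 => j
  | fuel + 1 =>
      if j * t + i < (seq.length : Int) then
        if PySem.List.pyGet? seq (j * t + i) = some 1 then j
        else whileA seq t i (j + 1) fuel
      else j

def core_to_vec (seq : List Int) (t : Int) : List Int :=
  let temp := List.replicate t.toNat (-1)   -- [-1] * t
  let ref := ref_idx seq
  (PySem.List.pyRange 0 t 1).foldl (fun temp i =>
    let j := whileA seq t i 0 (seq.length + 1)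
    -- idx = (i - ref) % t lies in [0, t) whenever this loop body runs (t > 0), so .toNat is exact
    let idx := PySem.Int.mod (i - ref) t
    temp.set idx.toNat (PySem.Int.floordiv (j * t + i - ref) t)) temp

-- ===== PORT B =====
def buildFirst (seq : List Int) (t : Int) : PySem.Dict Int Int :=
  (PySem.List.enumerate seq 0).foldl (fun d kb =>
    let i := PySem.Int.mod kb.1 t
    if kb.2 = 1 ∧ ¬ (d.contains i = true) then d.insert i kb.1 else d) PySem.Dict.empty

def core_to_vec_alt (seq : List Int) (t : Int) : List Int :=
  if t ≤ 0 then []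
  else
    let ref := ref_idx seq
    let n : Int := seq.length
    let first := buildFirst seq t
    (PySem.List.pyRange 0 t 1).foldl (fun out p =>
      let i := PySem.Int.mod (p + ref) t
      let k := match first.get? i with
               | some k => k
               | none => max 0 (-(PySem.Int.floordiv (i - n) t)) * t + i
      out ++ [PySem.Int.floordiv (k - ref) t]) []

-- ===== PRECONDITION & SPEC =====
def Spec_core_to_vec (seq : List Int) (t : Int) (out : List Int) : Prop := out = core_to_vec_alt seq t
instance (seq : List Int) (t : Int) (out : List Int) : Decidable (Spec_core_to_vec seq t out) := by unfold Spec_core_to_vec; infer_instance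

-- ===== CLAIM (what is proved, stated in full; the proofs are below) =====
def Claim_equal_core_to_vec : Prop := ∀ (seq : List Int) (t : Int), Dom_core_to_vec seq t → Spec_core_to_vec seq t (core_to_vec seq t)

-- ===== LEMMAS AND PROOFS =====

-- the value A's inner loop lands on for column i, as B computes it
def kcol (seq : List Int) (t i : Int) : Int :=
  match (buildFirst seq t).get? i with
  | some k => k
  | none => max 0 (-(PySem.Int.floordiv (i - (seq.length : Int)) t)) * t + i

-- a hit in column i: index k < len(seq) with k % t = i and seq[k] = 1
def ColHit (seq : List Int) (t i k : Int) : Prop :=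
  0 ≤ k ∧ k < (seq.length : Int) ∧ PySem.Int.mod k t = i ∧ PySem.List.pyGet? seq k = some 1

theorem whileA_eq (seq : List Int) (t i : Int) (j0 js : Int) (fuel : Nat)
    (hle : j0 ≤ js) (hfuel : (js - j0).toNat < fuel)
    (hstop : (seq.length : Int) ≤ js * t + i ∨ PySem.List.pyGet? seq (js * t + i) = some 1)
    (hmin : ∀ j, j0 ≤ j → j < js →
      j * t + i < (seq.length : Int) ∧ PySem.List.pyGet? seq (j * t + i) ≠ some 1) :
    whileA seq t i j0 fuel = js := by
  induction fuel generalizing j0 with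
  | zero => omega
  | succ f ih =>
    by_cases hj : j0 = js
    · subst hj
      unfold whileA
      rcases hstop with h | h
      · rw [if_neg (by omega)]
      · by_cases hlt : j0 * t + i < (seq.length : Int)
        · rw [if_pos hlt, if_pos h]
        · rw [if_neg hlt]
    · have hlt : j0 < js := lt_of_le_of_ne hle hj
      obtain ⟨h1, h2⟩ := hmin j0 le_rfl hlt
      unfold whileA
      rw [if_pos h1, if_neg h2]
      exact ih (j0 + 1) (by omega) (by omega) (fun j hj1 hj2 => hmin j (by omega) hj2)

theorem buildFirst_append (seq : List Int) (b t : Int) :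
    buildFirst (seq ++ [b]) t =
      (let d := buildFirst seq t
       let i := PySem.Int.mod (seq.length : Int) t
       if b = 1 ∧ ¬ (d.contains i = true) then d.insert i (seq.length : Int) else d) := by
  simp [buildFirst, PySem.List.enumerate_append, List.foldl_append, PySem.List.enumerate_cons]

theorem pyGet?_append_lt (seq : List Int) (b k : Int) (h0 : 0 ≤ k) (h1 : k < (seq.length : Int)) :
    PySem.List.pyGet? (seq ++ [b]) k = PySem.List.pyGet? seq k := by
  rw [PySem.List.pyGet?_of_nonneg (seq ++ [b]) h0, PySem.List.pyGet?_of_nonneg seq h0]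
  rw [List.getElem?_append_left (by omega)]

theorem buildFirst_char (seq : List Int) (t : Int) (i : Int) :
    (∀ k, (buildFirst seq t).get? i = some k →
      ColHit seq t i k ∧ ∀ k', 0 ≤ k' → k' < k → PySem.Int.mod k' t = i →
        PySem.List.pyGet? seq k' ≠ some 1)
    ∧ ((buildFirst seq t).get? i = none → ∀ k, ¬ ColHit seq t i k) := by
  induction seq using List.reverseRecOn with
  | nil =>
    constructor
    · intro k h; simp [buildFirst, PySem.List.enumerate_nil, PySem.Dict.get?_empty] at h
    · intro _ k hk; exact absurd hk.2.1 (by simp [ColHit] at hk ⊢; omega)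
  | append_singleton seq b ih =>
    rw [buildFirst_append]
    simp only []
    set d := buildFirst seq t with hd
    set i' := PySem.Int.mod (seq.length : Int) t with hi'
    have hn : ((seq ++ [b]).length : Int) = (seq.length : Int) + 1 := by simp
    have hlast : PySem.List.pyGet? (seq ++ [b]) (seq.length : Int) = some b := by
      exact PySem.List.pyGet?_append_length (pre := seq) (y := b) (ys := ([] : List Int))
    by_cases hins : b = 1 ∧ ¬ (d.contains i' = true)
    · rw [if_pos hins]
      by_cases hii : i = i'
      · subst hii
        rw [PySem.Dict.get?_insert_self]
        constructor
        · intro k hk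
          injection hk with hk; subst hk
          constructor
          · exact ⟨by positivity, by omega, hi'.symm, by rw [hlast, hins.1]⟩
          · intro k' h0 h1 h2 h3
            have hnone : d.get? i' = none := by
              rcases h : d.get? i' with _ | v
              · rfl
              · exact absurd (by rw [PySem.Dict.contains_eq_isSome_get?, h]; rfl) hins.2
            exact ih.2 hnone k' ⟨h0, h1, h2, by rwa [← pyGet?_append_lt seq b k' h0 h1]⟩
        · intro h; simp at h
      · rw [PySem.Dict.get?_insert_of_ne _ _ hii]
        constructor
        · intro k hk
          obtain ⟨⟨a1,a2,a3,a4⟩, amin⟩ := ih.1 k hk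
          refine ⟨⟨a1, by omega, a3, by rwa [pyGet?_append_lt seq b k a1 a2]⟩, ?_⟩
          intro k' h0 h1 h2
          have hk'lt : k' < (seq.length : Int) := by omega
          rw [pyGet?_append_lt seq b k' h0 hk'lt]
          exact amin k' h0 h1 h2
        · intro h k hk
          rcases hk with ⟨a1, a2, a3, a4⟩
          by_cases hkn : k < (seq.length : Int)
          · exact ih.2 h k ⟨a1, hkn, a3, by rwa [pyGet?_append_lt seq b k a1 hkn] at a4⟩
          · have : k = (seq.length : Int) := by omega
            subst this
            exact hii (by rw [← a3, hi'])
    · rw [if_neg hins]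
      constructor
      · intro k hk
        obtain ⟨⟨a1,a2,a3,a4⟩, amin⟩ := ih.1 k hk
        refine ⟨⟨a1, by omega, a3, by rwa [pyGet?_append_lt seq b k a1 a2]⟩, ?_⟩
        intro k' h0 h1 h2
        rw [pyGet?_append_lt seq b k' h0 (by omega)]
        exact amin k' h0 h1 h2
      · intro h k hk
        rcases hk with ⟨a1, a2, a3, a4⟩
        by_cases hkn : k < (seq.length : Int)
        · exact ih.2 h k ⟨a1, hkn, a3, by rwa [pyGet?_append_lt seq b k a1 hkn] at a4⟩
        · have hkeq : k = (seq.length : Int) := by omega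
          subst hkeq
          rw [hlast] at a4
          injection a4 with a4
          rcases (not_and_or.mp hins) with hb | hc
          · exact hb a4
          · rw [not_not] at hc
            rw [PySem.Dict.contains_eq_isSome_get?] at hc
            have : i' = i := by rw [hi', a3]
            rw [this, h] at hc
            simp at hc

theorem mod_mul_add (j t i : Int) (ht : 0 < t) (hi0 : 0 ≤ i) (hit : i < t) :
    PySem.Int.mod (j * t + i) t = i := by
  rw [PySem.Int.mod_eq_emod_of_pos ht]
  have h1 : j * t + i = i + t * j := by ring
  rw [h1, Int.add_mul_emod_self_left, Int.emod_eq_of_lt hi0 hit]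

-- A's while loop lands exactly on B's kcol value, for every real column index
theorem col_eq (seq : List Int) (t i : Int) (ht : 0 < t) (hi0 : 0 ≤ i) (hit : i < t) :
    whileA seq t i 0 (seq.length + 1) * t + i = kcol seq t i := by
  unfold kcol
  cases h : (buildFirst seq t).get? i with
  | some k =>
    obtain ⟨⟨hk0, hkn, hkmod, hk1⟩, hmin⟩ := (buildFirst_char seq t i).1 k h
    have hjs : PySem.Int.floordiv k t * t + i = k := by
      conv_rhs => rw [← PySem.Int.floordiv_mul_add_mod k t]
      rw [hkmod]
    set js := PySem.Int.floordiv k t with hjsdef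
    have hjs0 : 0 ≤ js := by
      rw [hjsdef, PySem.Int.floordiv_eq_ediv_of_pos ht]
      exact Int.ediv_nonneg hk0 (le_of_lt ht)
    have hjsle : js ≤ k := by
      have h1 : js * 1 ≤ js * t := by
        exact mul_le_mul_of_nonneg_left (by omega) hjs0
      omega
    have hres : whileA seq t i 0 (seq.length + 1) = js := by
      apply whileA_eq seq t i 0 js (seq.length + 1) hjs0 (by omega)
      · right; rw [hjs]; exact hk1
      · intro j hj0 hjlt
        have hjk : j * t + i < k := by
          have h1 : (j + 1) * t ≤ js * t := mul_le_mul_of_nonneg_right (by omega) (by omega)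
          have h2 : (j + 1) * t = j * t + t := by ring
          omega
        have hj0' : 0 ≤ j * t + i := by
          have := mul_nonneg hj0 (le_of_lt ht); omega
        exact ⟨by omega, hmin (j * t + i) hj0' hjk (mod_mul_add j t i ht hi0 hit)⟩
    rw [hres, hjs]
  | none =>
    have hnone := (buildFirst_char seq t i).2 h
    set n : Int := (seq.length : Int) with hndef
    have hq := (PySem.Int.neg_floordiv_neg_eq_iff_of_pos (a := n - i) (b := t)
      (q := -(PySem.Int.floordiv (-(n - i)) t)) ht).mp rfl
    have hni : -(n - i) = i - n := by ring
    rw [hni] at hq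
    set q := -(PySem.Int.floordiv (i - n) t) with hqdef
    obtain ⟨hb1, hb2⟩ := hq
    have hres : whileA seq t i 0 (seq.length + 1) = max 0 q := by
      apply whileA_eq
      · exact le_max_left 0 q
      · -- fuel: max 0 q ≤ n
        rcases le_or_gt q 0 with hq0 | hq0
        · rw [max_eq_left hq0]; omega
        · rw [max_eq_right (le_of_lt hq0)]
          have h1 : (q - 1) * 1 ≤ (q - 1) * t := mul_le_mul_of_nonneg_left (by omega) (by omega)
          omega
      · left
        rcases le_or_gt q 0 with hq0 | hq0
        · rw [max_eq_left hq0]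
          have h1 : q * t ≤ 0 := mul_nonpos_of_nonpos_of_nonneg hq0 (by omega)
          omega
        · rw [max_eq_right (le_of_lt hq0)]; omega
      · intro j hj0 hjlt
        have hq0 : 0 < q := by
          by_contra hq0
          rw [max_eq_left (by omega)] at hjlt
          omega
        rw [max_eq_right (le_of_lt hq0)] at hjlt
        have h1 : j * t ≤ (q - 1) * t := mul_le_mul_of_nonneg_right (by omega) (by omega)
        have hlt : j * t + i < n := by omega
        refine ⟨hlt, fun hget => ?_⟩
        have hj0' : 0 ≤ j * t + i := by
          have := mul_nonneg hj0 (le_of_lt ht); omega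
        exact hnone (j * t + i) ⟨hj0', hlt, mod_mul_add j t i ht hi0 hit, hget⟩
    rw [hres]

theorem foldl_set_getElem? (g : Int → Nat) (f : Int → Int) (l : List Int) (a : List Int)
    (hg : ∀ i ∈ l, g i < a.length) (p : Nat) :
    (l.foldl (fun acc i => acc.set (g i) (f i)) a)[p]? =
      match l.reverse.find? (fun i => g i == p) with
      | some i => some (f i)
      | none => a[p]? := by
  induction l generalizing a with
  | nil => simp
  | cons x rest ih =>
    simp only [List.foldl_cons, List.reverse_cons, List.find?_append]
    rw [ih (a.set (g x) (f x)) (fun i hi => by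
      simpa using hg i (List.mem_cons_of_mem x hi))]
    cases h : rest.reverse.find? (fun i => g i == p) with
    | some i => simp
    | none =>
      simp only [List.find?_singleton]
      by_cases hgx : g x = p
      · have hp : p < a.length := hgx ▸ hg x List.mem_cons_self
        simp [hgx, hp]
      · have hb : (g x == p) = false := by simp [hgx]
        simp [hb, hgx]

theorem find?_eq_some_of_unique {α : Type} (pred : α → Bool) (l : List α) (i0 : α)
    (h1 : i0 ∈ l) (h2 : pred i0 = true) (h3 : ∀ j ∈ l, pred j = true → j = i0) :
    l.find? pred = some i0 := by
  induction l with
  | nil => cases h1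
  | cons x rest ih =>
    by_cases hx : pred x = true
    · rw [List.find?_cons_of_pos hx, h3 x List.mem_cons_self hx]
    · rw [List.find?_cons_of_neg hx]
      have hmem : i0 ∈ rest := by
        cases h1 with
        | head => exact absurd h2 hx
        | tail _ h => exact h
      exact ih hmem (fun j hj hp => h3 j (List.mem_cons_of_mem x hj) hp)

-- ===== VERDICT (by name: the statement is the Claim_ definition above) =====
theorem core_to_vec_spec : Claim_equal_core_to_vec := by
  unfold Claim_equal_core_to_vec Spec_core_to_vec
  intro seq t _
  by_cases htle : t ≤ 0
  · have hrange : PySem.List.pyRange 0 t 1 = [] := PySem.List.pyRange_one_eq_nil (by omega)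
    have htn : t.toNat = 0 := by omega
    simp [core_to_vec, core_to_vec_alt, hrange, htn, htle]
  · have ht : 0 < t := by omega
    have hA : core_to_vec seq t =
        (PySem.List.pyRange 0 t 1).foldl (fun acc i =>
          acc.set ((PySem.Int.mod (i - ref_idx seq) t).toNat)
            (PySem.Int.floordiv (whileA seq t i 0 (seq.length + 1) * t + i - ref_idx seq) t))
          (List.replicate t.toNat (-1)) := rfl
    have hB : core_to_vec_alt seq t =
        (PySem.List.pyRange 0 t 1).foldl (fun out p =>
          out ++ [PySem.Int.floordiv (kcol seq t (PySem.Int.mod (p + ref_idx seq) t) - ref_idx seq) t]) [] := by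
      unfold core_to_vec_alt
      rw [if_neg htle]
      rfl
    rw [hA, hB, PySem.List.foldl_append_singleton_eq_map, List.nil_append]
    set ref := ref_idx seq with hrefdef
    apply List.ext_getElem?
    intro p
    have hglt : ∀ i ∈ PySem.List.pyRange 0 t 1,
        (PySem.Int.mod (i - ref) t).toNat < (List.replicate t.toNat (-1 : Int)).length := by
      intro i _
      have h1 := PySem.Int.mod_nonneg (i - ref) ht
      have h2 := PySem.Int.mod_lt (i - ref) ht
      simp only [List.length_replicate]
      omega
    rw [foldl_set_getElem? _ _ _ _ hglt p]
    by_cases hp : p < t.toNat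
    · -- the unique i in [0,t) mapped to slot p is i0 = (p + ref) % t
      set i0 := PySem.Int.mod ((p : Int) + ref) t with hi0def
      have hi00 : 0 ≤ i0 := PySem.Int.mod_nonneg _ ht
      have hi0t : i0 < t := PySem.Int.mod_lt _ ht
      have hi0e : i0 = ((p : Int) + ref) % t := by
        rw [hi0def, PySem.Int.mod_eq_emod_of_pos ht]
      have hkey : ∀ j : Int, 0 ≤ j → j < t → PySem.Int.mod (j - ref) t = (p : Int) → j = i0 := by
        intro j hj0 hjt hj
        rw [PySem.Int.mod_eq_emod_of_pos ht] at hj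
        have : ((p : Int) + ref) % t = j % t := by
          rw [← hj, Int.add_emod ((j - ref) % t) ref, Int.emod_emod_of_dvd _ dvd_rfl,
            ← Int.add_emod]
          ring_nf
        rw [hi0e, this, Int.emod_eq_of_lt hj0 hjt]
      have hpred : PySem.Int.mod (i0 - ref) t = (p : Int) := by
        rw [PySem.Int.mod_eq_emod_of_pos ht, hi0e]
        rw [Int.sub_emod (((p : Int) + ref) % t) ref t, Int.emod_emod_of_dvd _ dvd_rfl,
          ← Int.sub_emod]
        have : (p : Int) + ref - ref = (p : Int) := by ring
        rw [this, Int.emod_eq_of_lt (by omega) (by omega)]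
      have hfind : (PySem.List.pyRange 0 t 1).reverse.find?
          (fun i => (PySem.Int.mod (i - ref) t).toNat == p) = some i0 := by
        apply find?_eq_some_of_unique
        · rw [List.mem_reverse, PySem.List.mem_pyRange_one]; omega
        · simp only [beq_iff_eq]; omega
        · intro j hj hjp
          rw [List.mem_reverse, PySem.List.mem_pyRange_one] at hj
          simp only [beq_iff_eq] at hjp
          apply hkey j hj.1 hj.2
          have := PySem.Int.mod_nonneg (j - ref) ht
          omega
      have hrhs : ((PySem.List.pyRange 0 t 1).map (fun p =>
          PySem.Int.floordiv (kcol seq t (PySem.Int.mod (p + ref) t) - ref) t))[p]? =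
          some (PySem.Int.floordiv (kcol seq t (PySem.Int.mod ((p : Int) + ref) t) - ref) t) := by
        have hgp : (PySem.List.pyRange 0 t 1)[p]? = some ((p : Int)) := by
          rw [List.getElem?_eq_getElem (by simp only [PySem.List.length_pyRange_one]; omega)]
          rw [PySem.List.getElem_pyRange_one]
          simp
        rw [List.getElem?_map, hgp]
        rfl
      rw [hfind]
      rw [hrhs]
      show some (PySem.Int.floordiv (whileA seq t i0 0 (seq.length + 1) * t + i0 - ref) t) = _
      rw [col_eq seq t i0 ht hi00 hi0t]
    · -- out of range on both sides
      have hfind : (PySem.List.pyRange 0 t 1).reverse.find?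
          (fun i => (PySem.Int.mod (i - ref) t).toNat == p) = none := by
        rw [List.find?_eq_none]
        intro j hj
        rw [List.mem_reverse] at hj
        have h2 := PySem.Int.mod_lt (j - ref) ht
        have h1 := PySem.Int.mod_nonneg (j - ref) ht
        simp only [beq_iff_eq]
        omega
      have h1 : (List.replicate t.toNat (-1 : Int))[p]? = none :=
        List.getElem?_eq_none (by simp only [List.length_replicate]; omega)
      have h2 : ((PySem.List.pyRange 0 t 1).map (fun p =>
          PySem.Int.floordiv (kcol seq t (PySem.Int.mod (p + ref) t) - ref) t))[p]? = none :=
        List.getElem?_eq_none (by simp only [List.length_map, PySem.List.length_pyRange_one]; omega)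
      rw [hfind]
      show (List.replicate t.toNat (-1 : Int))[p]? = _
      rw [h1, h2]
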